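-- pv_equiv track=rewrite | github.com/zhhzhhzhh391/djangoServerTest1 | book/niukeTest.py | yongGanNiuNiu
-- ===== SOURCE A (Python) =====
-- def yongGanNiuNiu(x,f,d,p):
--     day = 0
--     while f>0:
--         d = d - x
--         day = day + 1
--         f = f -1
--     while d>=0:
--         day = day + 1
--         d = d - (x + p)
--     return day-1
-- ===== SOURCE B (Python) =====
-- def yongGanNiuNiu(x, f, d, p):
--     f0 = f if f > 0 else 0
--     d0 = d - x * f0
--     if d0 < 0:
--         return f0 - 1
--     return f0 + d0 // (x + p)
-- ===== Notes on version B (the rewrite author's own statement) =====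
-- stated objective: faster
-- what changed: Replaced the two day-by-day simulation loops by a closed form: f0 = max(f,0) days of the first phase, then floor division of the remaining d by (x+p).
import Mathlib
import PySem

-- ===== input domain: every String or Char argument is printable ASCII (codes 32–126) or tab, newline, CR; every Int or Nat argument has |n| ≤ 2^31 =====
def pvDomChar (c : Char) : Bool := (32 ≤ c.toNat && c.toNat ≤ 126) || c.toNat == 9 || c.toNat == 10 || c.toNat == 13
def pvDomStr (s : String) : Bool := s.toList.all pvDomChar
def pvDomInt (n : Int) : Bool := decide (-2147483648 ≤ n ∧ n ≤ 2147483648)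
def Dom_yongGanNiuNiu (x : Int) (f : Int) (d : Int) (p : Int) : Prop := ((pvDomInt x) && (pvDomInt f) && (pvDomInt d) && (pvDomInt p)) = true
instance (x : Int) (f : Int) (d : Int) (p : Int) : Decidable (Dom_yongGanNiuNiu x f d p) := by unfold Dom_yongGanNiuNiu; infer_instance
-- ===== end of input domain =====

-- B replaces A's two day-by-day simulation loops with an O(1) closed form (max(f,0) plus a floor division).


-- ===== PORT A =====
-- first while loop: while f>0: d -= x; day += 1; f -= 1
def yongGanLoop1 (x : Int) : Int → Int → Int → Int × Int
  | f, d, day =>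
    if h : f > 0 then yongGanLoop1 x (f - 1) (d - x) (day + 1) else (d, day)
termination_by f _ _ => f.toNat
decreasing_by omega

-- second while loop: while d>=0: day += 1; d -= (x+p); fuel makes it total
-- (fuel is exhausted only on inputs where the Python loop never terminates, outside Pre_)
def yongGanLoop2 (s : Int) : Nat → Int → Int → Int
  | 0, _, day => day
  | fuel + 1, d, day => if d ≥ 0 then yongGanLoop2 s fuel (d - s) (day + 1) else day

def yongGanNiuNiu (x : Int) (f : Int) (d : Int) (p : Int) : Int :=
  let r := yongGanLoop1 x f d 0
  yongGanLoop2 (x + p) (r.1.natAbs + 1) r.1 r.2 - 1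

-- ===== PORT B =====
def yongGanNiuNiu_alt (x : Int) (f : Int) (d : Int) (p : Int) : Int :=
  let f0 := if f > 0 then f else 0
  let d0 := d - x * f0
  if d0 < 0 then f0 - 1 else f0 + PySem.Int.floordiv d0 (x + p)

-- ===== PRECONDITION & SPEC =====
-- Pre_ excludes exactly the inputs where A's second loop never terminates (d left ≥ 0 and step x+p ≤ 0):
-- A returns no value there (it diverges), so nothing returned by A is excluded.
def Pre_yongGanNiuNiu (x : Int) (f : Int) (d : Int) (p : Int) : Prop :=
  d - x * (if f > 0 then f else 0) < 0 ∨ x + p > 0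
instance (x : Int) (f : Int) (d : Int) (p : Int) : Decidable (Pre_yongGanNiuNiu x f d p) := by
  unfold Pre_yongGanNiuNiu; infer_instance
def pvWitness_yongGanNiuNiu : Int × Int × Int × Int := (2, 3, 10, 1)
def Spec_yongGanNiuNiu (x : Int) (f : Int) (d : Int) (p : Int) (out : Int) : Prop := out = yongGanNiuNiu_alt x f d p
instance (x : Int) (f : Int) (d : Int) (p : Int) (out : Int) : Decidable (Spec_yongGanNiuNiu x f d p out) := by unfold Spec_yongGanNiuNiu; infer_instance

-- ===== CLAIM (what is proved, stated in full; the proofs are below) =====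
def Claim_equal_yongGanNiuNiu : Prop := ∀ (x : Int) (f : Int) (d : Int) (p : Int), Dom_yongGanNiuNiu x f d p → Pre_yongGanNiuNiu x f d p → Spec_yongGanNiuNiu x f d p (yongGanNiuNiu x f d p)

-- ===== LEMMAS AND PROOFS =====
theorem yongGanLoop1_eq (x : Int) : ∀ (f d day : Int),
    yongGanLoop1 x f d day = (d - x * (if f > 0 then f else 0), day + (if f > 0 then f else 0)) := by
  intro f
  induction hn : f.toNat generalizing f with
  | zero =>
    intro d day
    rw [yongGanLoop1]
    have hf : ¬ f > 0 := by omega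
    simp [hf]
  | succ n ih =>
    intro d day
    rw [yongGanLoop1]
    have hf : f > 0 := by omega
    have h1 : (f - 1).toNat = n := by omega
    rw [dif_pos hf, ih (f - 1) h1]
    by_cases h2 : f - 1 > 0
    · rw [if_pos h2, if_pos hf, Prod.mk.injEq]
      constructor
      · ring
      · ring
    · have hf1 : f = 1 := by omega
      subst hf1
      norm_num

theorem yongGanLoop2_eq (s : Int) (hs : s > 0) : ∀ (fuel : Nat) (d day : Int),
    d < s * fuel →
    yongGanLoop2 s fuel d day = day + (if d < 0 then 0 else d / s + 1) := by
  intro fuel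
  induction fuel with
  | zero =>
    intro d day hlt
    have : d < 0 := by simpa using hlt
    simp [yongGanLoop2, this]
  | succ n ih =>
    intro d day hlt
    push_cast at hlt
    have hexp : s * ((n : Int) + 1) = s * n + s := by ring
    by_cases hd : d ≥ 0
    · rw [yongGanLoop2, if_pos hd]
      have hlt' : d - s < s * n := by omega
      rw [ih (d - s) (day + 1) hlt']
      by_cases h2 : d - s < 0
      · have hzero : d / s = 0 := Int.ediv_eq_zero_of_lt hd (by omega)
        rw [if_pos h2, if_neg (by omega : ¬ d < 0), hzero]
        omega
      · have hdiv : (d - s) / s = d / s - 1 := by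
          have h3 := Int.add_mul_ediv_right d (-1) (show s ≠ 0 by omega)
          have h4 : d + -1 * s = d - s := by ring
          rw [h4] at h3
          omega
        rw [if_neg h2, if_neg (by omega : ¬ d < 0), hdiv]
        omega
    · rw [yongGanLoop2, if_neg hd]
      rw [if_pos (by omega : d < 0)]
      omega

-- ===== VERDICT (by name: the statement is the Claim_ definition above) =====
theorem yongGanNiuNiu_spec : Claim_equal_yongGanNiuNiu := by
  intro x f d p _ hpre
  unfold Spec_yongGanNiuNiu yongGanNiuNiu yongGanNiuNiu_alt
  rw [yongGanLoop1_eq]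
  simp only
  by_cases hneg : d - x * (if f > 0 then f else 0) < 0
  · rw [yongGanLoop2, if_neg (by omega : ¬ d - x * (if f > 0 then f else 0) ≥ 0),
      if_pos hneg]
    omega
  · have hs : x + p > 0 := by
      rcases hpre with h | h
      · omega
      · exact h
    have hfuel : d - x * (if f > 0 then f else 0) <
        (x + p) * (((d - x * (if f > 0 then f else 0)).natAbs + 1 : Nat) : Int) := by
      push_cast
      nlinarith [le_abs_self (d - x * (if f > 0 then f else 0)),
        abs_nonneg (d - x * (if f > 0 then f else 0))]
    rw [yongGanLoop2_eq (x + p) hs _ _ _ hfuel,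
      PySem.Int.floordiv_eq_ediv_of_pos hs, if_neg hneg, if_neg hneg]
    omega
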